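-- pv_equiv track=rewrite | github.com/XhyDds/creep | chiplab-chiplab_diff/sims/verilator/run_prog/log_script/parse_asm.py | merge_data32
-- ===== SOURCE A (Python) =====
-- def merge_data32(data32,align):
--     assert(align>=2)
--     if align==2:return data32,{addr:0xffffffff for addr in data32}
--     data64 = {}
--     mask64 = {}
--     offs_mask = (1<<align)-1
--     for a in data32:
--         if a &~offs_mask in data64:continue
--         a &=~offs_mask
--         mask = 0
--         data = 0
--         for i in range((1<<align)-4,-4,-4):
--             mask<<=32
--             data<<=32
--             if a+i in data32:
--                 mask |= 0xffffffff
--                 data |= data32[a+i]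
--         mask64[a] = mask
--         data64[a] = data
--     return data64,mask64
-- ===== SOURCE B (Python) =====
-- def merge_data32(data32, align):
--     assert align >= 2
--     if align == 2:
--         return data32, dict.fromkeys(data32, 0xffffffff)
--     size = 1 << align
--     # group the 32-bit entries by the base address of their 2^align-byte block
--     blocks = {}
--     for addr, val in data32.items():
--         off = addr % size
--         blocks.setdefault(addr - off, []).append((off, val))
--     data64 = {}
--     mask64 = {}
--     for base, words in blocks.items():
--         data = 0
--         mask = 0
--         for off, val in words:
--             if off % 4 == 0:  # only word-aligned entries occupy a 32-bit lane
--                 data |= val << (8 * off)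
--                 mask |= 0xffffffff << (8 * off)
--         data64[base] = data
--         mask64[base] = mask
--     return data64, mask64
-- ===== Notes on version B (the rewrite author's own statement) =====
-- stated objective: alternative
-- what changed: A builds each block by probing the dict at every 4-byte slot of the 2^align-byte block (shift-accumulate over all 2^(align-2) slots, restarted per key); B groups the entries into per-block buckets in one pass and then folds each bucket once, OR-ing every word-aligned entry in at its computed bit offset, so the per-block slot scan disappears. Pre_ excludes align < 2 (A's assert raises AssertionError) and association lists with duplicate keys, which do not represent a Python dict.
import Mathlib
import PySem

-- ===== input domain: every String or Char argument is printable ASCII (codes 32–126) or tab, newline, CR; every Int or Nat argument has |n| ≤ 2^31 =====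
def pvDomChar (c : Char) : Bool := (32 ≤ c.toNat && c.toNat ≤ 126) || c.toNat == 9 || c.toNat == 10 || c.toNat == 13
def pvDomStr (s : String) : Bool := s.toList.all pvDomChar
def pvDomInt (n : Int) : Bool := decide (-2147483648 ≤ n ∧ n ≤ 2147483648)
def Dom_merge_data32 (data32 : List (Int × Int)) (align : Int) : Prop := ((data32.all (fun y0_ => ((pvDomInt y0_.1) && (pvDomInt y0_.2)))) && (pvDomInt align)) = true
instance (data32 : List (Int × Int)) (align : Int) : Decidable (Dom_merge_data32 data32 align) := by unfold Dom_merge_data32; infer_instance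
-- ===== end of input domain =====

-- B replaces A's per-block scan of all 2^align word slots (a dict probe per slot) by grouping
-- the entries into buckets by block base address and folding each bucket once.

-- ===== PORT A =====
def merge_data32 (data32 : List (Int × Int)) (align : Int) : (List (Int × Int)) × (List (Int × Int)) :=
  -- assert align >= 2 : raises AssertionError for align < 2 (excluded by Pre_)
  if align == 2 then
    (data32,
      ((data32.map (·.1)).foldl (fun d addr => d.insert addr 0xffffffff)
        (PySem.Dict.empty : PySem.Dict Int Int)).items)
  else
    let d32 : PySem.Dict Int Int := PySem.Dict.mk data32
    let offs_mask : Int := (1 <<< align.toNat) - 1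
    let st := (data32.map (·.1)).foldl
      (fun (st : PySem.Dict Int Int × PySem.Dict Int Int) a =>
        if st.1.contains (PySem.Int.band a (Int.not offs_mask)) then st
        else
          let a := PySem.Int.band a (Int.not offs_mask)
          let md := (PySem.List.pyRange ((1 <<< align.toNat) - 4) (-4) (-4)).foldl
            (fun (md : Int × Int) i =>
              (if d32.contains (a + i) then PySem.Int.bor (md.1 <<< 32) 0xffffffff else md.1 <<< 32,
               if d32.contains (a + i) then PySem.Int.bor (md.2 <<< 32) (d32.getD (a + i) 0) else md.2 <<< 32))
            (0, 0)
          (st.1.insert a md.2, st.2.insert a md.1))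
      (PySem.Dict.empty, PySem.Dict.empty)
    (st.1.items, st.2.items)

-- ===== PORT B =====
-- `blocks.setdefault(base, []).append((off, val))` is ported as `Dict.modify base [] (· ++ [(off, val)])`:
-- same resulting dict (new keys append, existing keys keep their position and get the pair appended).
def merge_data32_alt (data32 : List (Int × Int)) (align : Int) : (List (Int × Int)) × (List (Int × Int)) :=
  if align == 2 then
    (data32, (PySem.List.dedup (data32.map (·.1))).map (fun addr => (addr, (0xffffffff : Int))))
  else
    let size : Int := 1 <<< align.toNat
    let blocks : PySem.Dict Int (List (Int × Int)) :=
      data32.foldl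
        (fun bl p =>
          bl.modify (p.1 - PySem.Int.mod p.1 size) []
            (· ++ [(PySem.Int.mod p.1 size, p.2)]))
        PySem.Dict.empty
    let st := blocks.items.foldl
      (fun (st : PySem.Dict Int Int × PySem.Dict Int Int) bw =>
        let md := bw.2.foldl
          (fun (md : Int × Int) w =>
            if PySem.Int.mod w.1 4 == 0 then
              (PySem.Int.bor md.1 (w.2 <<< (8 * w.1).toNat),
               PySem.Int.bor md.2 ((0xffffffff : Int) <<< (8 * w.1).toNat))
            else md)
          (0, 0)
        (st.1.insert bw.1 md.1, st.2.insert bw.1 md.2))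
      (PySem.Dict.empty, PySem.Dict.empty)
    (st.1.items, st.2.items)

-- ===== PRECONDITION & SPEC =====
-- Pre_ excludes align < 2 (A's assert raises AssertionError there) and association lists with a
-- duplicate key, which do not represent a Python dict (A's argument is a dict, so such lists never
-- arise; on them the two ports' first-match/iterate-all readings are both accidental).
def Pre_merge_data32 (data32 : List (Int × Int)) (align : Int) : Prop :=
  2 ≤ align ∧ (data32.map Prod.fst).Nodup
instance (data32 : List (Int × Int)) (align : Int) : Decidable (Pre_merge_data32 data32 align) := by
  unfold Pre_merge_data32; infer_instance

def pvWitness_merge_data32 : (List (Int × Int)) × Int := ([(0, 5), (8, 7)], 3)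

def Spec_merge_data32 (data32 : List (Int × Int)) (align : Int) (out : (List (Int × Int)) × (List (Int × Int))) : Prop := out = merge_data32_alt data32 align
instance (data32 : List (Int × Int)) (align : Int) (out : (List (Int × Int)) × (List (Int × Int))) : Decidable (Spec_merge_data32 data32 align out) := by unfold Spec_merge_data32; infer_instance

-- ===== CLAIM (what is proved, stated in full; the proofs are below) =====
def Claim_equal_merge_data32 : Prop := ∀ (data32 : List (Int × Int)) (align : Int), Dom_merge_data32 data32 align → Pre_merge_data32 data32 align → Spec_merge_data32 data32 align (merge_data32 data32 align)

-- ===== LEMMAS AND PROOFS =====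

-- ---- Integer bit-level toolkit (facts about PySem.Int.bor / band / <<< not in the prelude) ----

/-- Python-style infinite two's-complement test bit of an `Int`. -/
def pvTb (a : Int) (i : Nat) : Bool := if 0 ≤ a then a.toNat.testBit i else !((-a - 1).toNat.testBit i)

theorem pvTb_inj {a b : Int} (h : ∀ i, pvTb a i = pvTb b i) : a = b := by
  unfold pvTb at h
  rcases le_or_gt 0 a with ha | ha <;> rcases le_or_gt 0 b with hb | hb
  · have : a.toNat = b.toNat := Nat.eq_of_testBit_eq (fun i => by simpa [ha, hb] using h i)
    omega
  · exfalso
    have h1 : a.toNat.testBit (a.toNat + ((-b).toNat - 1)) = false :=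
      Nat.testBit_lt_two_pow (lt_of_le_of_lt (Nat.le_add_right _ _) Nat.lt_two_pow_self)
    have h2 : ((-b).toNat - 1).testBit (a.toNat + ((-b).toNat - 1)) = false :=
      Nat.testBit_lt_two_pow (lt_of_le_of_lt (Nat.le_add_left _ _) Nat.lt_two_pow_self)
    have := h (a.toNat + ((-b).toNat - 1))
    simp [ha, not_le.mpr hb, h1, h2] at this
  · exfalso
    have h1 : b.toNat.testBit (b.toNat + ((-a).toNat - 1)) = false :=
      Nat.testBit_lt_two_pow (lt_of_le_of_lt (Nat.le_add_right _ _) Nat.lt_two_pow_self)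
    have h2 : ((-a).toNat - 1).testBit (b.toNat + ((-a).toNat - 1)) = false :=
      Nat.testBit_lt_two_pow (lt_of_le_of_lt (Nat.le_add_left _ _) Nat.lt_two_pow_self)
    have := h (b.toNat + ((-a).toNat - 1))
    simp [hb, not_le.mpr ha, h1, h2] at this
  · have : ((-a).toNat - 1) = ((-b).toNat - 1) := by
      apply Nat.eq_of_testBit_eq
      intro i
      have := h i
      simp [not_le.mpr ha, not_le.mpr hb] at this
      exact this
    omega

theorem nat_and_div_two (a b : Nat) : (a &&& b) / 2 = a / 2 &&& b / 2 := by
  apply Nat.eq_of_testBit_eq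
  intro i
  simp [Nat.testBit_div_two, Nat.testBit_and]

theorem nat_xor_div_two (a b : Nat) : (a ^^^ b) / 2 = a / 2 ^^^ b / 2 := by
  apply Nat.eq_of_testBit_eq
  intro i
  simp [Nat.testBit_div_two, Nat.testBit_xor]

theorem nat_sub_of_and_eq (a : Nat) : ∀ b, a &&& b = b → a - b = a ^^^ b := by
  induction a using Nat.strong_induction_on with
  | _ a ih =>
    intro b h
    rcases Nat.eq_zero_or_pos a with rfl | hpos
    · have : b = 0 := by simpa using h.symm
      subst this; simp
    · have hd : a / 2 &&& b / 2 = b / 2 := by rw [← nat_and_div_two, h]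
      have iha : a / 2 - b / 2 = a / 2 ^^^ b / 2 := ih (a / 2) (Nat.div_lt_self hpos one_lt_two) _ hd
      have hble : b / 2 ≤ a / 2 := by rw [← hd]; exact Nat.and_le_left
      have hb2 : b % 2 ≤ a % 2 := by
        have h0 := congrArg (fun t => t.testBit 0) h
        simp only [Nat.testBit_and, Nat.testBit_zero] at h0
        rcases Nat.mod_two_eq_zero_or_one a with ha2 | ha2 <;>
          rcases Nat.mod_two_eq_zero_or_one b with hb2 | hb2 <;> simp [ha2, hb2] at h0 ⊢
      have hx2 : (a ^^^ b) % 2 = a % 2 - b % 2 := by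
        have := @Nat.xor_mod_two_eq a b
        omega
      have hxd : (a ^^^ b) / 2 = a / 2 ^^^ b / 2 := nat_xor_div_two a b
      omega

theorem nat_sub_and_eq_xor (y x : Nat) : y - (y &&& x) = y ^^^ (y &&& x) := by
  apply nat_sub_of_and_eq
  rw [← Nat.and_assoc, Nat.and_self]

theorem nat_sub_and_testBit (y x i : Nat) :
    (y - (y &&& x)).testBit i = (y.testBit i && !(x.testBit i)) := by
  rw [nat_sub_and_eq_xor]
  simp only [Nat.testBit_xor, Nat.testBit_and]
  cases y.testBit i <;> cases x.testBit i <;> rfl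

theorem pvTb_bor (a b : Int) (i : Nat) : pvTb (PySem.Int.bor a b) i = (pvTb a i || pvTb b i) := by
  unfold pvTb PySem.Int.bor
  rcases le_or_gt 0 a with ha | ha <;> rcases le_or_gt 0 b with hb | hb
  · simp [ha, hb, Nat.testBit_lor]
  · have hb' : ¬ 0 ≤ b := not_le.mpr hb
    simp only [ha, hb', if_true, if_false]
    have hlt : ¬ (0 ≤ -(((-b - 1).toNat - ((-b - 1).toNat &&& a.toNat) : Nat) : Int) - 1) := by omega
    rw [if_neg hlt]
    have harg : (-(-(((-b - 1).toNat - ((-b - 1).toNat &&& a.toNat) : Nat) : Int) - 1) - 1).toNat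
        = (-b - 1).toNat - ((-b - 1).toNat &&& a.toNat) := by omega
    rw [harg, nat_sub_and_testBit]
    cases hx : a.toNat.testBit i <;> cases hy : (-b - 1).toNat.testBit i <;> rfl
  · have ha' : ¬ 0 ≤ a := not_le.mpr ha
    simp only [ha', hb, if_true, if_false]
    have hlt : ¬ (0 ≤ -(((-a - 1).toNat - ((-a - 1).toNat &&& b.toNat) : Nat) : Int) - 1) := by omega
    rw [if_neg hlt]
    have harg : (-(-(((-a - 1).toNat - ((-a - 1).toNat &&& b.toNat) : Nat) : Int) - 1) - 1).toNat
        = (-a - 1).toNat - ((-a - 1).toNat &&& b.toNat) := by omega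
    rw [harg, nat_sub_and_testBit]
    cases hx : (-a - 1).toNat.testBit i <;> cases hy : b.toNat.testBit i <;> rfl
  · have ha' : ¬ 0 ≤ a := not_le.mpr ha
    have hb' : ¬ 0 ≤ b := not_le.mpr hb
    simp only [ha', hb', if_false]
    have hlt : ¬ (0 ≤ -((((-a - 1).toNat &&& (-b - 1).toNat : Nat)) : Int) - 1) := by omega
    rw [if_neg hlt]
    have harg : (-(-((((-a - 1).toNat &&& (-b - 1).toNat : Nat)) : Int) - 1) - 1).toNat
        = (-a - 1).toNat &&& (-b - 1).toNat := by omega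
    rw [harg, Nat.testBit_and]
    cases hx : (-a - 1).toNat.testBit i <;> cases hy : (-b - 1).toNat.testBit i <;> rfl

theorem pvTb_shl (a : Int) (k i : Nat) :
    pvTb (a <<< k) i = if i < k then false else pvTb a (i - k) := by
  unfold pvTb
  rw [Int.shiftLeft_eq]
  rcases le_or_gt 0 a with ha | ha
  · have h1 : 0 ≤ a * 2 ^ k := mul_nonneg ha (by positivity)
    rw [if_pos h1, if_pos ha]
    have h2 : (a * 2 ^ k).toNat = a.toNat * 2 ^ k := by
      obtain ⟨n, rfl⟩ := Int.eq_ofNat_of_zero_le ha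
      rw [show ((n : Int) * 2 ^ k) = ((n * 2 ^ k : Nat) : Int) from by push_cast; ring,
        Int.toNat_natCast, Int.toNat_natCast]
    rw [h2, Nat.testBit_mul_two_pow]
    rcases Nat.lt_or_ge i k with h | h
    · simp [h, Nat.not_le.mpr h]
    · simp [h, Nat.not_lt.mpr h]
  · have h1 : a * 2 ^ k < 0 := mul_neg_of_neg_of_pos ha (by positivity)
    rw [if_neg (not_le.mpr h1), if_neg (not_le.mpr ha)]
    have hy : 0 ≤ -a - 1 := by omega
    have h2 : (-(a * 2 ^ k) - 1).toNat = 2 ^ k * (-a - 1).toNat + (2 ^ k - 1) := by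
      have hcast : ((2 ^ k * (-a - 1).toNat + (2 ^ k - 1) : Nat) : Int)
          = 2 ^ k * (-a - 1) + ((2:Int) ^ k - 1) := by
        push_cast [Nat.one_le_two_pow, Int.toNat_of_nonneg hy]
        ring
      rw [show -(a * 2 ^ k) - 1 = ((2 ^ k * (-a - 1).toNat + (2 ^ k - 1) : Nat) : Int) from by
          rw [hcast]; ring,
        Int.toNat_natCast]
    rw [h2, Nat.testBit_two_pow_mul_add _ (by have := Nat.two_pow_pos k; omega)]
    rcases Nat.lt_or_ge i k with h | h
    · simp [h, Nat.testBit_two_pow_sub_one]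
    · simp [h, Nat.not_lt.mpr h]

theorem pv_zero_bor (a : Int) : PySem.Int.bor 0 a = a := by
  rw [PySem.Int.bor_comm]; exact PySem.Int.bor_zero a

theorem pv_bor_assoc (a b c : Int) :
    PySem.Int.bor (PySem.Int.bor a b) c = PySem.Int.bor a (PySem.Int.bor b c) := by
  apply pvTb_inj; intro i; simp [pvTb_bor, Bool.or_assoc]

theorem pv_shl_bor (a b : Int) (k : Nat) :
    (PySem.Int.bor a b) <<< k = PySem.Int.bor (a <<< k) (b <<< k) := by
  apply pvTb_inj; intro i
  simp only [pvTb_shl, pvTb_bor]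
  split <;> simp

theorem pv_shl_shl (a : Int) (j k : Nat) : (a <<< j) <<< k = a <<< (j + k) := by
  simp [Int.shiftLeft_eq, pow_add]; ring

theorem pv_zero_shl (k : Nat) : (0 : Int) <<< k = 0 := by simp [Int.shiftLeft_eq]

theorem pv_shl_zero (a : Int) : a <<< (0 : Nat) = a := by simp [Int.shiftLeft_eq]

theorem pv_shl_cast (a : Int) (k : Nat) : a <<< ((k : Nat) : Int) = a <<< k := by
  rw [Int.shiftLeft_eq_mul_pow, Int.shiftLeft_eq]
  push_cast
  ring

theorem nat_lor_pow2_sub_one (y m : Nat) :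
    y ||| (2 ^ m - 1) = 2 ^ m * (y / 2 ^ m) + (2 ^ m - 1) := by
  apply Nat.eq_of_testBit_eq
  intro i
  rw [Nat.testBit_lor,
    Nat.testBit_two_pow_mul_add _ (by have := Nat.two_pow_pos m; omega)]
  rcases Nat.lt_or_ge i m with h | h
  · simp [h, Nat.testBit_two_pow_sub_one]
  · have : (y / 2 ^ m).testBit (i - m) = y.testBit i := by
      rw [Nat.testBit_div_two_pow]
      congr 1
      omega
    simp [Nat.not_lt.mpr h, this, Nat.testBit_two_pow_sub_one]

theorem pv_not_eq (n : Int) : Int.not n = -n - 1 := by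
  rcases n with k | k <;> simp [Int.not, Int.negSucc_eq] <;> omega

/-- A's base mask `a & ~((1 << m) - 1)` is floor-alignment: `a - a % 2^m`. -/
theorem pv_band_not_mask (a : Int) (m : Nat) :
    PySem.Int.band a (Int.not (((1 <<< m : Nat) : Int) - 1))
      = a - PySem.Int.mod a ((1 <<< m : Nat) : Int) := by
  have hS : (((1 <<< m : Nat) : Int)) = 2 ^ m := by
    rw [Nat.shiftLeft_eq]; push_cast; ring
  have hPc : ((2 ^ m : Nat) : Int) = (2 : Int) ^ m := by push_cast; ring
  have hone : 1 ≤ 2 ^ m := Nat.one_le_two_pow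
  have hpos : (0 : Int) < 2 ^ m := by positivity
  rw [hS, pv_not_eq, PySem.Int.mod_eq_emod_of_pos hpos]
  have hmaskneg : ¬ (0 ≤ -(2 ^ m - 1 : Int) - 1) := by omega
  unfold PySem.Int.band
  rcases le_or_gt 0 a with ha | ha
  · rw [if_pos ha, if_neg hmaskneg]
    obtain ⟨x, rfl⟩ := Int.eq_ofNat_of_zero_le ha
    have h1 : (-(-((2:Int) ^ m - 1) - 1) - 1).toNat = 2 ^ m - 1 := by omega
    rw [h1, Int.toNat_natCast, Nat.and_two_pow_sub_one_eq_mod]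
    have h2 : ((x : Int)) % (2 : Int) ^ m = ((x % 2 ^ m : Nat) : Int) := by
      rw [← hPc]; push_cast; rfl
    have h3 : x % 2 ^ m ≤ x := Nat.mod_le _ _
    omega
  · rw [if_neg (not_le.mpr ha), if_neg hmaskneg]
    set y : Nat := (-a - 1).toNat with hydef
    have hay : a = -(y : Int) - 1 := by omega
    set d : Nat := y / 2 ^ m with hddef
    set s : Nat := y % 2 ^ m with hsdef
    have hy : 2 ^ m * d + s = y := Nat.div_add_mod y (2 ^ m)
    have hs : s < 2 ^ m := Nat.mod_lt _ (by omega)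
    have hyI : (y : Int) = (2 : Int) ^ m * d + s := by
      rw [← hPc]; exact_mod_cast hy.symm
    have h1 : (-(-((2:Int) ^ m - 1) - 1) - 1).toNat = 2 ^ m - 1 := by omega
    rw [h1, nat_lor_pow2_sub_one]
    have htI : ((2 ^ m - 1 - s : Nat) : Int) = (2 : Int) ^ m - 1 - s := by omega
    have hrew : a = ((2 ^ m - 1 - s : Nat) : Int) + (2 : Int) ^ m * (-(d : Int) - 1) := by
      rw [htI, hay, hyI]; ring
    have hmod : a % ((2 : Int) ^ m) = ((2 ^ m - 1 - s : Nat) : Int) := by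
      rw [hrew, Int.add_mul_emod_self_left]
      exact Int.emod_eq_of_lt (by positivity) (by omega)
    rw [hmod]
    have hLc : ((2 ^ m * d + (2 ^ m - 1) : Nat) : Int)
        = (2 : Int) ^ m * d + ((2 : Int) ^ m - 1) := by omega
    rw [hLc, hay, htI, hyI]
    ring

-- ---- Canonical description shared by the two ports ----

def pvBase (S a : Int) : Int := a - PySem.Int.mod a S

def pvBases (S : Int) (xs : List (Int × Int)) : List Int :=
  PySem.Set.ofList (xs.map fun p => pvBase S p.1)

def pvW (S : Int) (p : Int × Int) : Int × Int := (PySem.Int.mod p.1 S, p.2)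

def pvContrib (S b : Int) (c : Int × Int → Int) (p : Int × Int) : Int :=
  if pvBase S p.1 = b ∧ PySem.Int.mod (PySem.Int.mod p.1 S) 4 = 0 then
    c p <<< (8 * PySem.Int.mod p.1 S).toNat
  else 0

def pvAgg (S b : Int) (c : Int × Int → Int) (l : List (Int × Int)) : Int :=
  l.foldl (fun acc p => PySem.Int.bor acc (pvContrib S b c p)) 0

def pvBigOr (h : Nat → Int) (n : Nat) : Int :=
  (List.range n).foldl (fun acc j => PySem.Int.bor acc (h j <<< (32 * j))) 0

def pvDesc (n : Nat) : List Int := (List.range n).map (fun k => 4 * ((n - 1 - k : Nat) : Int))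

def pvG (d32 : PySem.Dict Int Int) (b : Int) (c : Int × Int → Int) (i : Int) : Int :=
  if d32.contains (b + i) then c (b + i, d32.getD (b + i) 0) else 0

theorem pv_foldl_bor_init (c : Int × Int → Int) (l : List (Int × Int)) (a : Int) :
    l.foldl (fun acc p => PySem.Int.bor acc (c p)) a
      = PySem.Int.bor a (l.foldl (fun acc p => PySem.Int.bor acc (c p)) 0) := by
  induction l generalizing a with
  | nil => simp [PySem.Int.bor_zero]
  | cons p t ih =>
    simp only [List.foldl_cons]
    rw [ih (PySem.Int.bor a (c p)), ih (PySem.Int.bor 0 (c p)), pv_zero_bor, pv_bor_assoc]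

theorem pvAgg_cons (S b : Int) (c : Int × Int → Int) (p : Int × Int) (t : List (Int × Int)) :
    pvAgg S b c (p :: t) = PySem.Int.bor (pvContrib S b c p) (pvAgg S b c t) := by
  unfold pvAgg
  simp only [List.foldl_cons]
  rw [pv_foldl_bor_init, pv_zero_bor]

theorem pvBigOr_congr {h h' : Nat → Int} (n : Nat) (e : ∀ j < n, h j = h' j) :
    pvBigOr h n = pvBigOr h' n := by
  unfold pvBigOr
  apply PySem.List.foldl_congr_mem
  intro acc j hj
  rw [e j (List.mem_range.mp hj)]

theorem pvBigOr_zero (n : Nat) {h : Nat → Int} (e : ∀ j < n, h j = 0) : pvBigOr h n = 0 := by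
  induction n with
  | zero => rfl
  | succ k ih =>
    unfold pvBigOr
    rw [List.range_succ, List.foldl_append]
    have : pvBigOr h k = 0 := ih (fun j hj => e j (Nat.lt_succ_of_lt hj))
    unfold pvBigOr at this
    rw [this]
    simp [e k (Nat.lt_succ_self k), PySem.Int.bor_zero]

theorem pvBigOr_succ (h : Nat → Int) (n : Nat) :
    pvBigOr h (n + 1) = PySem.Int.bor (pvBigOr h n) (h n <<< (32 * n)) := by
  unfold pvBigOr
  rw [List.range_succ, List.foldl_append]
  rfl

theorem pvBigOr_point (n j0 : Nat) (v : Int) {h : Nat → Int} (hj : j0 < n) (h0 : h j0 = 0) :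
    pvBigOr (fun j => if j = j0 then v else h j) n
      = PySem.Int.bor (v <<< (32 * j0)) (pvBigOr h n) := by
  induction n with
  | zero => omega
  | succ k ih =>
    rw [pvBigOr_succ, pvBigOr_succ]
    rcases Nat.lt_or_ge j0 k with hlt | hge
    · rw [ih hlt]
      simp only [if_neg (Nat.ne_of_gt hlt)]
      rw [pv_bor_assoc]
    · have hk : j0 = k := by omega
      subst hk
      have hcongr : pvBigOr (fun j => if j = j0 then v else h j) j0 = pvBigOr h j0 :=
        pvBigOr_congr j0 (fun j hjlt => by rw [if_neg (Nat.ne_of_lt hjlt)])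
      rw [hcongr, h0, pv_zero_shl, PySem.Int.bor_zero, if_pos rfl, PySem.Int.bor_comm]

theorem pvDesc_succ (n : Nat) : pvDesc (n + 1) = (4 * (n : Int)) :: pvDesc n := by
  unfold pvDesc
  rw [List.range_succ_eq_map]
  simp only [List.map_cons, List.map_map, Function.comp_def]
  norm_num
  omega

theorem pv_scan_eq (g : Int → Int) : ∀ (n : Nat) (acc : Int),
    (pvDesc n).foldl (fun d i => PySem.Int.bor (d <<< (32 : Nat)) (g i)) acc
      = PySem.Int.bor (acc <<< (32 * n)) (pvBigOr (fun j => g (4 * j)) n) := by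
  intro n
  induction n with
  | zero =>
    intro acc
    unfold pvDesc pvBigOr
    simp only [List.range_zero, List.map_nil, List.foldl_nil, Nat.mul_zero]
    rw [pv_shl_zero]
    exact (PySem.Int.bor_zero acc).symm
  | succ k ih =>
    intro acc
    rw [pvDesc_succ]
    simp only [List.foldl_cons]
    rw [ih, pvBigOr_succ, pv_shl_bor, pv_shl_shl]
    have h32 : 32 + 32 * k = 32 * (k + 1) := by ring
    rw [h32, pv_bor_assoc]
    congr 1
    push_cast
    rw [PySem.Int.bor_comm]

-- ---- dictionary-shape helpers ----

theorem pv_get?_mk_map {α : Type} (F : Int → α) (s : List Int) (x : Int) :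
    (PySem.Dict.mk (s.map fun b => (b, F b))).get? x = if x ∈ s then some (F x) else none := by
  induction s with
  | nil => simp [show (PySem.Dict.mk ([] : List (Int × α))).get? x = none from rfl]
  | cons b t ih =>
    simp only [List.map_cons]
    rw [PySem.Dict.get?_mk_cons]
    by_cases hbx : b = x
    · subst hbx
      simp
    · rw [if_neg (by simpa using hbx), ih]
      simp [List.mem_cons, Ne.symm hbx]

theorem pv_contains_mk_map {α : Type} (F : Int → α) (s : List Int) (x : Int) :
    (PySem.Dict.mk (s.map fun b => (b, F b))).contains x = decide (x ∈ s) := by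
  rw [PySem.Dict.contains_eq_isSome_get?, pv_get?_mk_map]
  by_cases h : x ∈ s <;> simp [h]

theorem pvBase_mod (S a : Int) (hS : 0 < S) : PySem.Int.mod (pvBase S a) S = 0 := by
  unfold pvBase
  rw [PySem.Int.mod_eq_emod_of_pos hS, PySem.Int.mod_eq_emod_of_pos hS]
  have hdm := Int.mul_ediv_add_emod a S
  have h1 : a - a % S = S * (a / S) := by omega
  rw [h1]
  exact Int.mul_emod_right S _

theorem pv_mod_of_offset (S : Int) (n : Nat) (hS : S = 4 * n) (b : Int)
    (hb : PySem.Int.mod b S = 0) (j : Nat) (hj : j < n) :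
    PySem.Int.mod (b + 4 * j) S = 4 * j := by
  have hpos : (0:Int) < S := by omega
  rw [PySem.Int.mod_eq_emod_of_pos hpos] at hb ⊢
  obtain ⟨q, rfl⟩ : S ∣ b := Int.dvd_of_emod_eq_zero hb
  rw [show S * q + 4 * (j:Int) = 4 * (j:Int) + S * q from by ring, Int.add_mul_emod_self_left]
  exact Int.emod_eq_of_lt (by positivity) (by omega)

theorem pv_key_offset (S : Int) (n : Nat) (hS : S = 4 * n) (hn : 0 < n) (b k0 : Int)
    (hb : PySem.Int.mod b S = 0) :
    (pvBase S k0 = b ∧ PySem.Int.mod (PySem.Int.mod k0 S) 4 = 0)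
      ↔ ∃ j0 : Nat, j0 < n ∧ k0 = b + 4 * j0 := by
  have hpos : (0:Int) < S := by omega
  constructor
  · rintro ⟨h1, h2⟩
    have hr0 : 0 ≤ PySem.Int.mod k0 S := PySem.Int.mod_nonneg k0 hpos
    have hr1 : PySem.Int.mod k0 S < S := PySem.Int.mod_lt k0 hpos
    rw [PySem.Int.mod_eq_emod_of_pos (by norm_num : (0:Int) < 4)] at h2
    obtain ⟨t, ht⟩ : (4:Int) ∣ PySem.Int.mod k0 S := Int.dvd_of_emod_eq_zero h2
    refine ⟨t.toNat, by omega, ?_⟩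
    unfold pvBase at h1
    omega
  · rintro ⟨j0, hj0, rfl⟩
    have hmod := pv_mod_of_offset S n hS b hb j0 hj0
    refine ⟨?_, ?_⟩
    · unfold pvBase
      rw [hmod]; ring
    · rw [hmod, PySem.Int.mod_eq_emod_of_pos (by norm_num : (0:Int) < 4)]
      simp [Int.mul_emod_right]

theorem pv_inner_eq (S : Int) (n : Nat) (hS : S = 4 * n) (hn : 0 < n) (c : Int × Int → Int) :
    ∀ (l : List (Int × Int)), (l.map Prod.fst).Nodup → ∀ b : Int, PySem.Int.mod b S = 0 →
    pvBigOr (fun j => pvG (PySem.Dict.mk l) b c (4 * j)) n = pvAgg S b c l := by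
  intro l
  induction l with
  | nil =>
    intro _ b _
    refine pvBigOr_zero n (fun j hj => ?_)
    unfold pvG
    rw [if_neg]
    simp [PySem.Dict.contains_mk]
  | cons p t ih =>
    rintro hnd b hb
    obtain ⟨k0, v0⟩ := p
    have hnd' : (k0 :: t.map Prod.fst).Nodup := by simpa using hnd
    have hk0 : k0 ∉ t.map Prod.fst := (List.nodup_cons.mp hnd').1
    have hndt : (t.map Prod.fst).Nodup := (List.nodup_cons.mp hnd').2
    rw [pvAgg_cons, ← ih hndt b hb]
    by_cases hrel : ∃ j0 : Nat, j0 < n ∧ k0 = b + 4 * (j0 : Int)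
    · obtain ⟨j0, hj0, hk0eq⟩ := hrel
      have hcond := (pv_key_offset S n hS hn b k0 hb).mpr ⟨j0, hj0, hk0eq⟩
      have hmod : PySem.Int.mod k0 S = 4 * j0 := by
        rw [hk0eq]; exact pv_mod_of_offset S n hS b hb j0 hj0
      have hcontrib : pvContrib S b c (k0, v0) = c (k0, v0) <<< (32 * j0) := by
        unfold pvContrib
        rw [if_pos hcond, hmod]
        congr 1
        omega
      have hstep : pvBigOr (fun j => pvG (PySem.Dict.mk ((k0, v0) :: t)) b c (4 * j)) n
          = pvBigOr (fun j => if j = j0 then c (k0, v0)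
              else pvG (PySem.Dict.mk t) b c (4 * j)) n := by
        refine pvBigOr_congr n (fun j hj => ?_)
        by_cases hjj : j = j0
        · subst hjj
          unfold pvG
          have hc : (PySem.Dict.mk ((k0, v0) :: t)).contains (b + 4 * (j:Int)) = true := by
            simp [PySem.Dict.contains_mk, hk0eq]
          rw [if_pos hc, if_pos rfl]
          have hg : (PySem.Dict.mk ((k0, v0) :: t)).getD (b + 4 * (j:Int)) 0 = v0 := by
            rw [PySem.Dict.getD_eq_get?_getD, PySem.Dict.get?_mk_cons,
              if_pos (by simp [hk0eq])]
            rfl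
          rw [hg, ← hk0eq]
        · have hne : k0 ≠ b + 4 * (j:Int) := by
            intro hcontra
            apply hjj
            have : (4:Int) * j = 4 * j0 := by omega
            omega
          unfold pvG
          have hcsame : (PySem.Dict.mk ((k0, v0) :: t)).contains (b + 4 * (j:Int))
              = (PySem.Dict.mk t).contains (b + 4 * (j:Int)) := by
            simp [PySem.Dict.contains_mk, hne]
          have hgsame : (PySem.Dict.mk ((k0, v0) :: t)).getD (b + 4 * (j:Int)) 0
              = (PySem.Dict.mk t).getD (b + 4 * (j:Int)) 0 := by
            rw [PySem.Dict.getD_eq_get?_getD, PySem.Dict.get?_mk_cons,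
              if_neg (by simpa using hne), ← PySem.Dict.getD_eq_get?_getD]
          rw [hcsame, hgsame, if_neg hjj]
      rw [hstep, pvBigOr_point n j0 _ hj0 ?_, hcontrib]
      unfold pvG
      rw [if_neg]
      rw [← hk0eq]
      simp only [PySem.Dict.contains_mk]
      intro hcontra
      rw [List.any_eq_true] at hcontra
      obtain ⟨q, hq, hqeq⟩ := hcontra
      exact hk0 (by
        rw [beq_iff_eq] at hqeq
        exact hqeq ▸ List.mem_map_of_mem hq)
    · have hcond : ¬ (pvBase S k0 = b ∧ PySem.Int.mod (PySem.Int.mod k0 S) 4 = 0) :=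
        fun hc => hrel ((pv_key_offset S n hS hn b k0 hb).mp hc)
      have hcontrib : pvContrib S b c (k0, v0) = 0 := by
        unfold pvContrib; rw [if_neg hcond]
      rw [hcontrib, pv_zero_bor]
      refine pvBigOr_congr n (fun j hj => ?_)
      have hne : k0 ≠ b + 4 * (j:Int) := fun hcontra => hrel ⟨j, hj, hcontra⟩
      unfold pvG
      have hcsame : (PySem.Dict.mk ((k0, v0) :: t)).contains (b + 4 * (j:Int))
          = (PySem.Dict.mk t).contains (b + 4 * (j:Int)) := by
        simp [PySem.Dict.contains_mk, hne]
      have hgsame : (PySem.Dict.mk ((k0, v0) :: t)).getD (b + 4 * (j:Int)) 0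
          = (PySem.Dict.mk t).getD (b + 4 * (j:Int)) 0 := by
        rw [PySem.Dict.getD_eq_get?_getD, PySem.Dict.get?_mk_cons,
          if_neg (by simpa using hne), ← PySem.Dict.getD_eq_get?_getD]
      rw [hcsame, hgsame]

-- ---- the two loops, named, with port-unfold bridges ----

def pvInnerA (d32 : PySem.Dict Int Int) (offs : List Int) (b : Int) : Int × Int :=
  offs.foldl
    (fun (md : Int × Int) i =>
      (if d32.contains (b + i) then PySem.Int.bor (md.1 <<< 32) 0xffffffff else md.1 <<< 32,
       if d32.contains (b + i) then PySem.Int.bor (md.2 <<< 32) (d32.getD (b + i) 0) else md.2 <<< 32))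
    (0, 0)

def pvStepA (mask : Int) (d32 : PySem.Dict Int Int) (offs : List Int) :
    PySem.Dict Int Int × PySem.Dict Int Int → Int → PySem.Dict Int Int × PySem.Dict Int Int :=
  fun st a =>
    if st.1.contains (PySem.Int.band a (Int.not mask)) then st
    else
      (st.1.insert (PySem.Int.band a (Int.not mask))
         (pvInnerA d32 offs (PySem.Int.band a (Int.not mask))).2,
       st.2.insert (PySem.Int.band a (Int.not mask))
         (pvInnerA d32 offs (PySem.Int.band a (Int.not mask))).1)

def pvInnerB (ws : List (Int × Int)) : Int × Int :=
  ws.foldl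
    (fun (md : Int × Int) w =>
      if PySem.Int.mod w.1 4 == 0 then
        (PySem.Int.bor md.1 (w.2 <<< (8 * w.1).toNat),
         PySem.Int.bor md.2 ((0xffffffff : Int) <<< (8 * w.1).toNat))
      else md)
    (0, 0)

def pvBucket (S b : Int) (l : List (Int × Int)) : List (Int × Int) :=
  ((l.map fun p => (pvBase S p.1, pvW S p)).filter (fun q => q.1 == b)).map (·.2)

theorem portA_eq (data32 : List (Int × Int)) (align : Int) (h : ¬ (align == 2) = true) :
    merge_data32 data32 align
      = (((data32.map (·.1)).foldl
            (pvStepA (((1 <<< align.toNat : Nat) : Int) - 1) (PySem.Dict.mk data32)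
              (PySem.List.pyRange (((1 <<< align.toNat : Nat) : Int) - 4) (-4) (-4)))
            (PySem.Dict.empty, PySem.Dict.empty)).1.items,
         ((data32.map (·.1)).foldl
            (pvStepA (((1 <<< align.toNat : Nat) : Int) - 1) (PySem.Dict.mk data32)
              (PySem.List.pyRange (((1 <<< align.toNat : Nat) : Int) - 4) (-4) (-4)))
            (PySem.Dict.empty, PySem.Dict.empty)).2.items) := by
  unfold merge_data32 pvStepA pvInnerA
  rw [if_neg h]

theorem portB_eq (data32 : List (Int × Int)) (align : Int) (h : ¬ (align == 2) = true) :
    merge_data32_alt data32 align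
      = (((data32.foldl
            (fun (bl : PySem.Dict Int (List (Int × Int))) p =>
              bl.modify (p.1 - PySem.Int.mod p.1 ((1 <<< align.toNat : Nat) : Int)) []
                (· ++ [(PySem.Int.mod p.1 ((1 <<< align.toNat : Nat) : Int), p.2)]))
            PySem.Dict.empty).items.foldl
            (fun (st : PySem.Dict Int Int × PySem.Dict Int Int) bw =>
              (st.1.insert bw.1 (pvInnerB bw.2).1, st.2.insert bw.1 (pvInnerB bw.2).2))
            (PySem.Dict.empty, PySem.Dict.empty)).1.items,
         ((data32.foldl
            (fun (bl : PySem.Dict Int (List (Int × Int))) p =>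
              bl.modify (p.1 - PySem.Int.mod p.1 ((1 <<< align.toNat : Nat) : Int)) []
                (· ++ [(PySem.Int.mod p.1 ((1 <<< align.toNat : Nat) : Int), p.2)]))
            PySem.Dict.empty).items.foldl
            (fun (st : PySem.Dict Int Int × PySem.Dict Int Int) bw =>
              (st.1.insert bw.1 (pvInnerB bw.2).1, st.2.insert bw.1 (pvInnerB bw.2).2))
            (PySem.Dict.empty, PySem.Dict.empty)).2.items) := by
  unfold merge_data32_alt pvInnerB
  rw [if_neg h]

-- ---- insert on a canonical map-shaped dict ----

theorem pv_insert_fresh (F F' : Int → Int) (s : List Int) (b' : Int)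
    (hmem : b' ∉ s) (v : Int) (hv : v = F' b') (hsame : ∀ b ∈ s, F b = F' b) :
    (PySem.Dict.mk (s.map fun b => (b, F b))).insert b' v
      = PySem.Dict.mk ((s ++ [b']).map fun b => (b, F' b)) := by
  apply PySem.Dict.ext
  rw [PySem.Dict.items_insert_of_not_contains _ _ (by rw [pv_contains_mk_map]; simpa using hmem)]
  rw [List.map_append, List.map_singleton]
  congr 1
  · apply List.map_congr_left
    intro b hb
    rw [hsame b hb]
  · rw [hv]

-- ---- B-side: bucket structure ----

theorem pvBucket_cons (S b : Int) (p : Int × Int) (t : List (Int × Int)) :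
    pvBucket S b (p :: t)
      = if pvBase S p.1 = b then pvW S p :: pvBucket S b t else pvBucket S b t := by
  unfold pvBucket
  simp only [List.map_cons, List.filter_cons]
  by_cases hb : pvBase S p.1 = b
  · rw [if_pos hb, if_pos (by simpa using hb)]
    simp
  · rw [if_neg hb, if_neg (by simpa using hb)]

theorem pv_contrib_eq (S b : Int) (c c' : Int × Int → Int)
    (hcc : ∀ p : Int × Int, c' (pvW S p) = c p) (p : Int × Int) (hb : pvBase S p.1 = b) :
    (if PySem.Int.mod (pvW S p).1 4 == 0
      then c' (pvW S p) <<< (((8 * (pvW S p).1).toNat : Nat) : Int) else 0)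
      = pvContrib S b c p := by
  have h1 : (pvW S p).1 = PySem.Int.mod p.1 S := rfl
  rw [hcc p]
  unfold pvContrib
  rw [h1]
  by_cases h4 : PySem.Int.mod (PySem.Int.mod p.1 S) 4 = 0
  · rw [if_pos (beq_iff_eq.mpr h4), if_pos (And.intro hb h4), pv_shl_cast]
  · rw [if_neg (fun hc => h4 (beq_iff_eq.mp hc)),
      if_neg (fun hc : _ ∧ _ => h4 hc.2)]

theorem pv_bucket_fold (S b : Int) (c c' : Int × Int → Int)
    (hcc : ∀ p : Int × Int, c' (pvW S p) = c p) :
    ∀ l : List (Int × Int),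
    (pvBucket S b l).foldl
      (fun a w => PySem.Int.bor a
        (if PySem.Int.mod w.1 4 == 0
          then c' w <<< (((8 * w.1).toNat : Nat) : Int) else 0)) 0
      = pvAgg S b c l := by
  intro l
  induction l with
  | nil => rfl
  | cons p t ih =>
    rw [pvAgg_cons, pvBucket_cons]
    by_cases hb : pvBase S p.1 = b
    · rw [if_pos hb]
      simp only [List.foldl_cons]
      rw [pv_foldl_bor_init
            (c := fun w => if PySem.Int.mod w.1 4 == 0
              then c' w <<< (((8 * w.1).toNat : Nat) : Int) else 0),
          ih, pv_zero_bor, pv_contrib_eq S b c c' hcc p hb]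
    · rw [if_neg hb, ih]
      have hc0 : pvContrib S b c p = 0 := by
        unfold pvContrib
        rw [if_neg (fun hc : _ ∧ _ => hb hc.1)]
      rw [hc0, pv_zero_bor]

theorem pvInnerB_bucket (S b : Int) (l : List (Int × Int)) :
    pvInnerB (pvBucket S b l)
      = (pvAgg S b Prod.snd l, pvAgg S b (fun _ => (0xffffffff : Int)) l) := by
  unfold pvInnerB
  have hstep : (fun (md : Int × Int) (w : Int × Int) =>
      if PySem.Int.mod w.1 4 == 0 then
        (PySem.Int.bor md.1 (w.2 <<< (((8 * w.1).toNat : Nat) : Int)),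
         PySem.Int.bor md.2 ((0xffffffff : Int) <<< (((8 * w.1).toNat : Nat) : Int)))
      else md)
      = (fun (md : Int × Int) (w : Int × Int) =>
        (PySem.Int.bor md.1 (if PySem.Int.mod w.1 4 == 0
           then w.2 <<< (((8 * w.1).toNat : Nat) : Int) else 0),
         PySem.Int.bor md.2 (if PySem.Int.mod w.1 4 == 0
           then (0xffffffff : Int) <<< (((8 * w.1).toNat : Nat) : Int) else 0))) := by
    funext md w
    by_cases h : (PySem.Int.mod w.1 4 == 0) = true
    · rw [if_pos h, if_pos h, if_pos h]
    · rw [if_neg h, if_neg h, if_neg h, PySem.Int.bor_zero, PySem.Int.bor_zero]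
  rw [hstep]
  refine Eq.trans
    (PySem.List.foldl_prod_mk
      (fun (a : Int) (w : Int × Int) => PySem.Int.bor a
        (if PySem.Int.mod w.1 4 == 0
          then w.2 <<< (((8 * w.1).toNat : Nat) : Int) else 0))
      (fun (a : Int) (w : Int × Int) => PySem.Int.bor a
        (if PySem.Int.mod w.1 4 == 0
          then (0xffffffff : Int) <<< (((8 * w.1).toNat : Nat) : Int) else 0))
      (pvBucket S b l) 0 0) ?_
  rw [pv_bucket_fold S b Prod.snd (fun w => w.2) (fun p => rfl) l,
    pv_bucket_fold S b (fun _ => (0xffffffff : Int)) (fun _ => (0xffffffff : Int)) (fun p => rfl) l]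

-- ---- B-side: the grouping dict is the canonical bucket map ----

theorem pv_foldl_map {al be ga : Type} (f : be → ga) (g : al → ga → al)
    (l : List be) (init : al) :
    (l.map f).foldl g init = l.foldl (fun a x => g a (f x)) init := by
  induction l generalizing init with
  | nil => rfl
  | cons x t ih => simp only [List.map_cons, List.foldl_cons, ih]

theorem pv_blocks_eq (S : Int) (data32 : List (Int × Int)) :
    (data32.foldl
      (fun (bl : PySem.Dict Int (List (Int × Int))) p =>
        bl.modify (p.1 - PySem.Int.mod p.1 S) [] (· ++ [(PySem.Int.mod p.1 S, p.2)]))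
      PySem.Dict.empty).items
    = (pvBases S data32).map (fun b => (b, pvBucket S b data32)) := by
  set blocks := data32.foldl
    (fun (bl : PySem.Dict Int (List (Int × Int))) p =>
      bl.modify (p.1 - PySem.Int.mod p.1 S) [] (· ++ [(PySem.Int.mod p.1 S, p.2)]))
    PySem.Dict.empty with hbl
  have hkeys : blocks.keys = pvBases S data32 := by
    rw [hbl]
    rw [PySem.Dict.keys_foldl_modify_key (key := fun p : Int × Int => p.1 - PySem.Int.mod p.1 S)]
    rw [PySem.Dict.keys_empty]
    rfl
  have hnd : blocks.keys.Nodup := by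
    rw [hkeys]; exact PySem.Set.nodup_ofList _
  have hconv : blocks
      = (data32.map (fun p : Int × Int => (pvBase S p.1, pvW S p))).foldl
          (fun (d : PySem.Dict Int (List (Int × Int))) (q : Int × (Int × Int)) =>
            d.modify q.1 [] (· ++ [q.2]))
          PySem.Dict.empty := by
    rw [hbl, pv_foldl_map]
    rfl
  have hgetD : ∀ b : Int, blocks.getD b [] = pvBucket S b data32 := by
    intro b
    rw [hconv, PySem.Dict.getD_foldl_modify_append, PySem.Dict.getD_empty]
    rfl
  rw [PySem.Dict.items_eq_map_keys blocks hnd [], hkeys]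
  apply List.map_congr_left
  intro b hb
  rw [hgetD b]

-- ---- B-side: the final insertion loop over nodup bases ----

theorem pv_ins_inv (F G : Int → Int) :
    ∀ (bs s : List Int), (s ++ bs).Nodup →
    bs.foldl (fun (st : PySem.Dict Int Int × PySem.Dict Int Int) b =>
        (st.1.insert b (F b), st.2.insert b (G b)))
      (PySem.Dict.mk (s.map fun b => (b, F b)), PySem.Dict.mk (s.map fun b => (b, G b)))
    = (PySem.Dict.mk ((s ++ bs).map fun b => (b, F b)),
       PySem.Dict.mk ((s ++ bs).map fun b => (b, G b))) := by
  intro bs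
  induction bs with
  | nil => intro s _; simp
  | cons b t ih =>
    intro s hnd
    have hmem : b ∉ s := by
      have := List.disjoint_of_nodup_append hnd
      exact fun hb => this hb (List.mem_cons_self)
    simp only [List.foldl_cons]
    rw [pv_insert_fresh F F s b hmem _ rfl (fun _ _ => rfl),
      pv_insert_fresh G G s b hmem _ rfl (fun _ _ => rfl)]
    have := ih (s ++ [b]) (by simpa using hnd)
    rw [List.append_assoc] at this
    simpa using this

-- ---- remaining bridges for the inner loop of A ----

theorem pv_shl_int32 (a : Int) : a <<< (32 : Int) = a <<< (32 : Nat) := by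
  have h := Int.shiftLeft_eq_mul_pow a 32
  rw [show ((32 : Nat) : Int) = (32 : Int) from by norm_num] at h
  rw [h, Int.shiftLeft_eq]
  push_cast
  ring

theorem pvInnerA_eq (d32 : PySem.Dict Int Int) (offs : List Int) (b : Int) :
    pvInnerA d32 offs b
      = (offs.foldl (fun d i => PySem.Int.bor (d <<< (32 : Nat))
            (pvG d32 b (fun _ => (0xffffffff : Int)) i)) 0,
         offs.foldl (fun d i => PySem.Int.bor (d <<< (32 : Nat)) (pvG d32 b Prod.snd i)) 0) := by
  unfold pvInnerA
  rw [PySem.List.foldl_prod_mk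
    (f := fun d i => if d32.contains (b + i) then PySem.Int.bor (d <<< 32) 0xffffffff
      else d <<< 32)
    (g := fun d i => if d32.contains (b + i) then PySem.Int.bor (d <<< 32) (d32.getD (b + i) 0)
      else d <<< 32)]
  congr 1 <;>
    (apply PySem.List.foldl_congr_mem
     intro acc i _
     unfold pvG
     by_cases hc : d32.contains (b + i) <;>
       simp [hc, pv_shl_int32, PySem.Int.bor_zero])

theorem pv_offs_eq (m : Nat) (n : Nat) (hn4 : ((1 <<< m : Nat) : Int) = 4 * n) (hn : 0 < n) :
    PySem.List.pyRange (((1 <<< m : Nat) : Int) - 4) (-4) (-4) = pvDesc n := by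
  unfold PySem.List.pyRange pvDesc
  rw [if_neg (by norm_num : ¬ (-4 : Int) = 0)]
  rw [if_neg (by norm_num : ¬ (0 : Int) < -4)]
  rw [if_pos (by omega : (-4 : Int) < ((1 <<< m : Nat) : Int) - 4)]
  have hcount : ((((1 <<< m : Nat) : Int) - 4 - -4 + - -4 - 1) / -(-4)).toNat = n := by
    simp only [neg_neg]
    omega
  rw [hcount]
  apply List.map_congr_left
  intro k hk
  rw [List.mem_range] at hk
  omega

-- ---- A-side loop invariant ----

theorem pv_A_inv (mask : Int) (d32 : PySem.Dict Int Int) (offs : List Int) :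
    ∀ (keys : List Int) (s : List Int), s.Nodup →
    keys.foldl (pvStepA mask d32 offs)
      (PySem.Dict.mk (s.map fun b => (b, (pvInnerA d32 offs b).2)),
       PySem.Dict.mk (s.map fun b => (b, (pvInnerA d32 offs b).1)))
    = (PySem.Dict.mk ((PySem.Set.update s
          (keys.map (fun a => PySem.Int.band a (Int.not mask)))).map
          fun b => (b, (pvInnerA d32 offs b).2)),
       PySem.Dict.mk ((PySem.Set.update s
          (keys.map (fun a => PySem.Int.band a (Int.not mask)))).map
          fun b => (b, (pvInnerA d32 offs b).1))) := by
  intro keys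
  induction keys with
  | nil =>
    intro s hs
    simp [PySem.Set.update_nil]
  | cons a ks ih =>
    intro s hs
    simp only [List.foldl_cons, List.map_cons, PySem.Set.update_cons]
    by_cases hmem : PySem.Int.band a (Int.not mask) ∈ s
    · have hstep : pvStepA mask d32 offs
          (PySem.Dict.mk (s.map fun b => (b, (pvInnerA d32 offs b).2)),
           PySem.Dict.mk (s.map fun b => (b, (pvInnerA d32 offs b).1))) a
          = (PySem.Dict.mk (s.map fun b => (b, (pvInnerA d32 offs b).2)),
             PySem.Dict.mk (s.map fun b => (b, (pvInnerA d32 offs b).1))) := by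
        unfold pvStepA
        rw [if_pos (by rw [pv_contains_mk_map]; simpa using hmem)]
      rw [hstep, PySem.Set.add_of_mem hmem]
      exact ih s hs
    · have hstep : pvStepA mask d32 offs
          (PySem.Dict.mk (s.map fun b => (b, (pvInnerA d32 offs b).2)),
           PySem.Dict.mk (s.map fun b => (b, (pvInnerA d32 offs b).1))) a
          = (PySem.Dict.mk ((s ++ [PySem.Int.band a (Int.not mask)]).map
               fun b => (b, (pvInnerA d32 offs b).2)),
             PySem.Dict.mk ((s ++ [PySem.Int.band a (Int.not mask)]).map
               fun b => (b, (pvInnerA d32 offs b).1))) := by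
        unfold pvStepA
        rw [if_neg (by rw [pv_contains_mk_map]; simpa using hmem)]
        rw [pv_insert_fresh _ _ s _ hmem _ rfl (fun b _ => rfl),
          pv_insert_fresh _ _ s _ hmem _ rfl (fun b _ => rfl)]
      rw [hstep, PySem.Set.add_of_not_mem hmem]
      exact ih (s ++ [PySem.Int.band a (Int.not mask)])
        (by
          simp [List.nodup_append, hs]
          exact fun y hy hye => hmem (hye ▸ hy))

theorem pv_update_nil_left (xs : List Int) :
    PySem.Set.update ([] : List Int) xs = PySem.Set.ofList xs :=
  PySem.Set.update_empty xs

-- ===== VERDICT (by name: the statement is the Claim_ definition above) =====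
theorem merge_data32_spec : Claim_equal_merge_data32 := by
  unfold Claim_equal_merge_data32
  intro data32 align _hdom hpre
  obtain ⟨halign, hnd⟩ := hpre
  unfold Spec_merge_data32
  by_cases h2 : (align == 2) = true
  · -- align = 2
    unfold merge_data32 merge_data32_alt
    rw [if_pos h2, if_pos h2]
    have hndl : ((data32.map (·.1)).map id).Nodup := by simpa using hnd
    have hA := PySem.Dict.items_foldl_insert_fresh (data32.map (·.1)) id
      (fun _ => (0xffffffff : Int)) (PySem.Dict.empty : PySem.Dict Int Int)
      (fun a _ => PySem.Dict.contains_empty (id a)) hndl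
    simp only [id_eq] at hA
    refine Prod.ext rfl ?_
    show (List.foldl (fun d addr => d.insert addr 0xffffffff) PySem.Dict.empty
        (data32.map (·.1))).items
      = (PySem.List.dedup (data32.map (·.1))).map (fun addr => (addr, (0xffffffff : Int)))
    rw [show PySem.List.dedup (data32.map (·.1)) = data32.map (·.1) from
      PySem.Set.ofList_eq_self_of_nodup _ (by simpa using hnd)]
    rw [hA]
    rfl
  · -- align ≥ 3
    have halign3 : 3 ≤ align := by
      have hne : align ≠ 2 := by simpa using h2
      omega
    set m := align.toNat with hmdef
    have hm3 : 3 ≤ m := by omega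
    set S : Int := ((1 <<< m : Nat) : Int) with hSdef
    have hSc : S = (2 : Int) ^ m := by rw [hSdef, Nat.shiftLeft_eq]; push_cast; ring
    set n : Nat := 2 ^ (m - 2) with hndef
    have hn0 : 0 < n := Nat.two_pow_pos _
    have hS4 : S = 4 * n := by
      rw [hSc, hndef]
      rw [show m = 2 + (m - 2) by omega, pow_add]
      push_cast
      norm_num
    have hSpos : (0 : Int) < S := by omega
    rw [portA_eq _ _ h2, portB_eq _ _ h2]
    -- A side
    have hemp : (PySem.Dict.empty : PySem.Dict Int Int) = PySem.Dict.mk [] := rfl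
    rw [hemp]
    have hA := pv_A_inv (S - 1) (PySem.Dict.mk data32)
      (PySem.List.pyRange (S - 4) (-4) (-4)) (data32.map (·.1)) [] List.nodup_nil
    simp only [List.map_nil, pv_update_nil_left] at hA
    rw [hA]
    -- B side
    rw [pv_blocks_eq S data32]
    have hconv2 : ((pvBases S data32).map (fun b : Int => (b, pvBucket S b data32))).foldl
        (fun (st : PySem.Dict Int Int × PySem.Dict Int Int) (bw : Int × List (Int × Int)) =>
          (st.1.insert bw.1 (pvInnerB bw.2).1, st.2.insert bw.1 (pvInnerB bw.2).2))
        (PySem.Dict.mk ([] : List (Int × Int)), PySem.Dict.mk ([] : List (Int × Int)))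
        = (pvBases S data32).foldl
        (fun (st : PySem.Dict Int Int × PySem.Dict Int Int) (b : Int) =>
          (st.1.insert b (pvInnerB (pvBucket S b data32)).1,
           st.2.insert b (pvInnerB (pvBucket S b data32)).2))
        (PySem.Dict.mk ([] : List (Int × Int)), PySem.Dict.mk ([] : List (Int × Int))) := by
      rw [pv_foldl_map]
    rw [hconv2]
    have hBnd : (([] : List Int) ++ pvBases S data32).Nodup := by
      rw [List.nil_append]
      exact PySem.Set.nodup_ofList (data32.map fun p => pvBase S p.1)
    have hB := pv_ins_inv (fun b => (pvInnerB (pvBucket S b data32)).1)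
      (fun b => (pvInnerB (pvBucket S b data32)).2) (pvBases S data32) [] hBnd
    simp only [List.map_nil, List.nil_append] at hB
    rw [hB]
    -- identify bases and values
    have hbasefun : (data32.map (·.1)).map (fun a => PySem.Int.band a (Int.not (S - 1)))
        = data32.map (fun p => pvBase S p.1) := by
      rw [List.map_map]
      apply List.map_congr_left
      intro p _
      simp only [Function.comp_apply]
      exact pv_band_not_mask p.1 m
    have hinner : ∀ b ∈ PySem.Set.ofList (data32.map fun p => pvBase S p.1),
        pvInnerA (PySem.Dict.mk data32) (PySem.List.pyRange (S - 4) (-4) (-4)) b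
          = (pvAgg S b (fun _ => (0xffffffff : Int)) data32, pvAgg S b Prod.snd data32) := by
      intro b hb
      have hb0 : PySem.Int.mod b S = 0 := by
        rw [PySem.Set.mem_ofList] at hb
        obtain ⟨p, _, rfl⟩ := List.mem_map.mp hb
        exact pvBase_mod S p.1 hSpos
      rw [pvInnerA_eq, pv_offs_eq m n hS4 hn0, pv_scan_eq, pv_scan_eq,
        pv_zero_shl, pv_zero_bor, pv_zero_bor,
        pv_inner_eq S n hS4 hn0 _ data32 hnd b hb0,
        pv_inner_eq S n hS4 hn0 _ data32 hnd b hb0]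
    rw [hbasefun]
    show ((PySem.Dict.mk _).items, (PySem.Dict.mk _).items)
        = ((PySem.Dict.mk _).items, (PySem.Dict.mk _).items)
    refine Prod.ext ?_ ?_ <;>
      · show List.map _ _ = List.map _ _
        apply List.map_congr_left
        intro b hb
        rw [hinner b hb, pvInnerB_bucket]
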